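-- pv_equiv track=rewrite | github.com/itsMuyinza/B-roller | tools/wavespeed_story_pipeline.py | choose_primary_url
-- ===== SOURCE A (Python) =====
-- from typing import Any, Dict, List, Optional
--
-- class PipelineError(RuntimeError):
--     """Raised for recoverable pipeline failures."""
--
-- def choose_primary_url(urls: List[str], kind: str) -> str:
--     if not urls:
--         raise PipelineError(f"No output URL returned for {kind}.")
--     ext_priority: List[str]
--     if kind == "image":
--         ext_priority = [".png", ".jpg", ".jpeg", ".webp"]
--     else:
--         ext_priority = [".mp4", ".mov", ".webm", ".mkv"]
--     lowered = [u.lower() for u in urls]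
--     for ext in ext_priority:
--         for idx, item in enumerate(lowered):
--             if ext in item:
--                 return urls[idx]
--     return urls[0]
-- ===== SOURCE B (Python) =====
-- class PipelineError(RuntimeError):
--     """Raised for recoverable pipeline failures."""
--
-- def choose_primary_url(urls, kind):
--     # Single pass: score each URL by the index of the first priority extension
--     # it contains (len(exts) if none), keep the first URL with the lowest score.
--     if not urls:
--         raise PipelineError(f"No output URL returned for {kind}.")
--     if kind == "image":
--         exts = [".png", ".jpg", ".jpeg", ".webp"]
--     else:
--         exts = [".mp4", ".mov", ".webm", ".mkv"]
--
--     def score(u):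
--         low = u.lower()
--         p = 0
--         for e in exts:
--             if e in low:
--                 break
--             p += 1
--         return p
--
--     best_p = score(urls[0])
--     best_i = 0
--     idx = 1
--     for u in urls[1:]:
--         p = score(u)
--         if p < best_p:
--             best_p, best_i = p, idx
--         idx += 1
--     return urls[best_i]
-- ===== Notes on version B (the rewrite author's own statement) =====
-- stated objective: alternative
-- what changed: Replaced the extension-outer nested scan by a single pass over the URLs that scores each URL with the index of the first matching extension and keeps the first URL of minimal score (the min naturally yields urls[0] when nothing matches).
import Mathlib
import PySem

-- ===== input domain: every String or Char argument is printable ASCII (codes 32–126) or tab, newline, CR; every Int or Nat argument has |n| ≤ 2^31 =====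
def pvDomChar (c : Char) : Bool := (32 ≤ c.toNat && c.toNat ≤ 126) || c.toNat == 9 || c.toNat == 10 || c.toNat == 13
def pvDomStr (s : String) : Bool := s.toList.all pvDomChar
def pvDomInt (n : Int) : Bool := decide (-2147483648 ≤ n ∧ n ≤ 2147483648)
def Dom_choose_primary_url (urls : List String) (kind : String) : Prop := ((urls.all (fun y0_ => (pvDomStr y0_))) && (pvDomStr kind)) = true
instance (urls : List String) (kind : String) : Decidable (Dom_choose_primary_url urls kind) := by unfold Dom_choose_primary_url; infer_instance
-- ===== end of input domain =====

-- B replaces A's extension-outer nested scan by a single pass that scores each URL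
-- by the index of its first matching extension and keeps the first URL of minimal score.
-- A raises PipelineError on urls = []; those inputs are excluded by Pre_ (B raises there too).

-- ===== PORT A =====
-- inner 'for idx, item in enumerate(lowered): if ext in item: return urls[idx]'
def pvFindMatch : List String → String → Nat → Option Nat
  | [], _, _ => none
  | item :: t, ext, i => if PySem.Str.isIn ext item then some i else pvFindMatch t ext (i + 1)

-- outer 'for ext in ext_priority: …'
def pvOuterLoop : List String → List String → Option Nat
  | [], _ => none
  | ext :: t, lowered =>
    match pvFindMatch lowered ext 0 with
    | some i => some i
    | none => pvOuterLoop t lowered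

def choose_primary_url (urls : List String) (kind : String) : String :=
  -- 'if not urls: raise PipelineError' — excluded by Pre_choose_primary_url
  let ext_priority := if kind = "image" then [".png", ".jpg", ".jpeg", ".webp"]
                      else [".mp4", ".mov", ".webm", ".mkv"]
  let lowered := urls.map PySem.Str.lower
  match pvOuterLoop ext_priority lowered with
  | some idx => urls.getD idx ""
  | none => urls.getD 0 ""

-- ===== PORT B =====
-- 'score(u)': index of first ext contained in u.lower(), len(exts) if none
def pvScoreGo : List String → String → Nat
  | [], _ => 0
  | e :: t, low => if PySem.Str.isIn e low then 0 else pvScoreGo t low + 1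

def pvScore (exts : List String) (u : String) : Nat := pvScoreGo exts (PySem.Str.lower u)

-- 'for u in urls[1:]: …' keeping (best_p, best_i), idx running
def pvBestLoop (exts : List String) : List String → Nat → Nat × Nat → Nat × Nat
  | [], _, best => best
  | u :: rest, idx, best =>
    let p := pvScore exts u
    pvBestLoop exts rest (idx + 1) (if p < best.1 then (p, idx) else best)

def choose_primary_url_alt (urls : List String) (kind : String) : String :=
  match urls with
  | [] => ""   -- 'raise PipelineError' — excluded by Pre_choose_primary_url
  | u0 :: rest =>
    let exts := if kind = "image" then [".png", ".jpg", ".jpeg", ".webp"]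
                else [".mp4", ".mov", ".webm", ".mkv"]
    let best := pvBestLoop exts rest 1 (pvScore exts u0, 0)
    (u0 :: rest).getD best.2 ""

-- ===== PRECONDITION & SPEC =====
-- Pre_ excludes exactly urls = [], where the Python A raises PipelineError.
def Pre_choose_primary_url (urls : List String) (kind : String) : Prop := urls ≠ []
instance (urls : List String) (kind : String) : Decidable (Pre_choose_primary_url urls kind) := by unfold Pre_choose_primary_url; infer_instance

def pvWitness_choose_primary_url : List String × String := (["a.mp4", "b.png"], "image")

def Spec_choose_primary_url (urls : List String) (kind : String) (out : String) : Prop := out = choose_primary_url_alt urls kind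
instance (urls : List String) (kind : String) (out : String) : Decidable (Spec_choose_primary_url urls kind out) := by unfold Spec_choose_primary_url; infer_instance

-- ===== CLAIM (what is proved, stated in full; the proofs are below) =====
def Claim_equal_choose_primary_url : Prop := ∀ (urls : List String) (kind : String), Dom_choose_primary_url urls kind → Pre_choose_primary_url urls kind → Spec_choose_primary_url urls kind (choose_primary_url urls kind)

-- ===== LEMMAS AND PROOFS =====

theorem pvScoreGo_le (exts : List String) (low : String) : pvScoreGo exts low ≤ exts.length := by
  induction exts with
  | nil => simp [pvScoreGo]
  | cons e t ih => simp only [pvScoreGo, List.length_cons]; split <;> omega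

-- Nat-min folds
theorem pvMin_push (qs : List Nat) (a b : Nat) :
    min a (qs.foldr min b) = qs.foldr min (min a b) := by
  induction qs generalizing a b with
  | nil => rfl
  | cons q t ih =>
    simp only [List.foldr_cons]
    rw [← ih]
    omega

theorem pvMin_le_init (qs : List Nat) (a : Nat) : qs.foldr min a ≤ a := by
  induction qs with
  | nil => simp
  | cons q t ih => simp only [List.foldr_cons]; omega

theorem pvMin_lt_of_any (qs : List Nat) (a : Nat)
    (h : qs.any (fun p => decide (p < a)) = true) : qs.foldr min a < a := by
  induction qs with
  | nil => simp at h
  | cons q t ih =>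
    simp only [List.any_cons, Bool.or_eq_true, decide_eq_true_eq] at h
    simp only [List.foldr_cons]
    rcases h with h | h
    · have := pvMin_le_init t a; omega
    · have := ih h; omega

theorem pvMin_eq_of_none (qs : List Nat) (a : Nat)
    (h : qs.any (fun p => decide (p < a)) = false)
    (hle : ∀ p ∈ qs, a ≤ p) : qs.foldr min a = a := by
  induction qs with
  | nil => rfl
  | cons q t ih =>
    simp only [List.any_cons, Bool.or_eq_false_iff, decide_eq_false_iff_not, not_lt] at h
    simp only [List.foldr_cons]
    rw [ih h.2 (fun p hp => hle p (List.mem_cons_of_mem _ hp))]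
    have := hle q (List.mem_cons_self)
    omega

theorem pvMin_zero_mem (qs : List Nat) (a : Nat) (h : 0 ∈ qs) : qs.foldr min a = 0 := by
  induction qs with
  | nil => simp at h
  | cons q t ih =>
    simp only [List.foldr_cons]
    rcases List.mem_cons.mp h with h | h
    · omega
    · rw [ih h]; omega

-- characterization of A's inner loop
theorem pvFindMatch_none (xs : List String) (e : String) (i : Nat)
    (h : xs.any (fun x => PySem.Str.isIn e x) = false) : pvFindMatch xs e i = none := by
  induction xs generalizing i with
  | nil => rfl
  | cons x t ih =>
    simp only [List.any_cons, Bool.or_eq_false_iff, PySem.Str.isIn_eq] at h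
    simp [pvFindMatch, h.1, ih _ h.2]

theorem pvFindMatch_some (xs : List String) (e : String) (i : Nat)
    (h : xs.any (fun x => PySem.Str.isIn e x) = true) :
    pvFindMatch xs e i = some (i + xs.findIdx (fun x => PySem.Str.isIn e x)) := by
  induction xs generalizing i with
  | nil => simp at h
  | cons x t ih =>
    by_cases hx : PySem.Str.isIn e x = true
    · simp only [PySem.Str.isIn_eq] at hx
      simp [pvFindMatch, hx, List.findIdx_cons]
    · simp only [List.any_cons, Bool.or_eq_true] at h
      rcases h with h | h
      · exact absurd h hx
      · simp only [PySem.Str.isIn_eq] at hx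
        rw [Bool.not_eq_true] at hx
        simp only [pvFindMatch, PySem.Str.isIn_eq, hx, if_false, ih (i + 1) h, List.findIdx_cons,
          Bool.false_eq_true, cond_false]
        congr 1
        omega

-- characterization of A's outer loop: first index of minimal score when some URL matches
theorem pvOuter_char (exts : List String) (xs : List String) :
    pvOuterLoop exts xs =
      (if (xs.map (pvScoreGo exts)).any (fun p => decide (p < exts.length)) = true then
        some ((xs.map (pvScoreGo exts)).findIdx
          (fun p => p == (xs.map (pvScoreGo exts)).foldr min exts.length))
      else none) := by
  induction exts with
  | nil =>
    simp [pvOuterLoop, pvScoreGo]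
  | cons e t ih =>
    by_cases hm : xs.any (fun x => PySem.Str.isIn e x) = true
    · -- some URL contains e: result is first such index, and its score is 0
      have h0 : (0 : Nat) ∈ xs.map (pvScoreGo (e :: t)) := by
        rcases List.any_eq_true.mp hm with ⟨x, hx, hin⟩
        exact List.mem_map.mpr ⟨x, hx, by
          simp only [PySem.Str.isIn_eq] at hin
          simp [pvScoreGo, hin]⟩
      have hany : (xs.map (pvScoreGo (e :: t))).any
          (fun p => decide (p < (e :: t).length)) = true := by
        refine List.any_eq_true.mpr ⟨0, h0, by simp⟩
      have hminz := pvMin_zero_mem (xs.map (pvScoreGo (e :: t))) (e :: t).length h0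
      simp only [pvOuterLoop, pvFindMatch_some xs e 0 hm, hany, if_true, Nat.zero_add, hminz]
      congr 1
      rw [List.findIdx_map]
      congr 1
      funext x
      by_cases hx : PySem.Chars.isIn e.toList x.toList = true <;> simp [pvScoreGo, hx]
    · -- no URL contains e: every score is score w.r.t. t, plus one
      have hmap : xs.map (pvScoreGo (e :: t)) = (xs.map (pvScoreGo t)).map (· + 1) := by
        rw [List.map_map]
        refine List.map_congr_left (fun x hx => ?_)
        have hch : PySem.Chars.isIn e.toList x.toList = false := by
          by_contra hc
          rw [Bool.not_eq_false] at hc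
          exact hm (List.any_eq_true.mpr ⟨x, hx, by simpa using hc⟩)
        simp [pvScoreGo, hch]
      have hnone : pvFindMatch xs e 0 = none :=
        pvFindMatch_none xs e 0 (by simpa using hm)
      have hfold : ((xs.map (pvScoreGo t)).map (· + 1)).foldr min (e :: t).length
          = (xs.map (pvScoreGo t)).foldr min t.length + 1 := by
        generalize (xs.map (pvScoreGo t)) = qs
        induction qs with
        | nil => simp
        | cons q qt ihq => simp only [List.map_cons, List.foldr_cons, ihq]; omega
      simp only [pvOuterLoop, hnone, ih, hmap, hfold]
      generalize List.map (pvScoreGo t) xs = qs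
      rw [List.any_map, List.findIdx_map]
      have hpred : ((fun p => decide (p < (e :: t).length)) ∘ (· + 1 : Nat → Nat))
          = fun p => decide (p < t.length) := by
        funext p
        simp only [Function.comp_apply, List.length_cons, decide_eq_decide]
        omega
      have hpred2 : ((fun p => p == qs.foldr min t.length + 1) ∘ (· + 1 : Nat → Nat))
          = fun p => p == qs.foldr min t.length := by
        funext p
        simp only [Function.comp_apply]
        by_cases h : p = qs.foldr min t.length <;> simp [h]
      rw [hpred, hpred2]

-- characterization of B's loop
theorem pvBestLoop_spec (exts : List String) (us : List String) (idx bp bi : Nat) :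
    pvBestLoop exts us idx (bp, bi) =
      (if (us.map (pvScore exts)).any (fun p => decide (p < bp)) = true then
        ((us.map (pvScore exts)).foldr min bp,
         idx + (us.map (pvScore exts)).findIdx
           (fun p => p == (us.map (pvScore exts)).foldr min bp))
      else (bp, bi)) := by
  induction us generalizing idx bp bi with
  | nil => simp [pvBestLoop]
  | cons u rest ih =>
    simp only [pvBestLoop, List.map_cons, List.any_cons, List.foldr_cons]
    by_cases hp : pvScore exts u < bp
    · simp only [hp, if_pos, decide_eq_true_eq, if_true]
      rw [ih]
      by_cases hr : (rest.map (pvScore exts)).any (fun p => decide (p < pvScore exts u)) = true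
      · have hlt := pvMin_lt_of_any (rest.map (pvScore exts)) (pvScore exts u) hr
        have heq : min (pvScore exts u) ((rest.map (pvScore exts)).foldr min bp)
            = (rest.map (pvScore exts)).foldr min (pvScore exts u) := by
          rw [pvMin_push]; congr 1; omega
        simp only [hr, if_true, decide_true, Bool.true_or, heq, List.findIdx_cons]
        have hne : (pvScore exts u == (rest.map (pvScore exts)).foldr min (pvScore exts u)) = false := by
          simp; omega
        simp only [hne, cond_false, Prod.mk.injEq]
        exact ⟨by trivial, by omega⟩
      · have hnolt : ∀ p ∈ rest.map (pvScore exts), pvScore exts u ≤ p := by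
          intro p hpm
          by_contra hc
          exact hr (List.any_eq_true.mpr ⟨p, hpm, by simp; omega⟩)
        have hfix := pvMin_eq_of_none (rest.map (pvScore exts)) (pvScore exts u)
          (by simpa using hr) hnolt
        have heq : min (pvScore exts u) ((rest.map (pvScore exts)).foldr min bp)
            = pvScore exts u := by
          rw [pvMin_push]
          have : min (pvScore exts u) bp = pvScore exts u := by omega
          rw [this, hfix]
        simp only [hr, Bool.false_eq_true, if_false, decide_true, Bool.true_or, if_true, heq,
          List.findIdx_cons]
        have hme : (pvScore exts u == pvScore exts u) = true := by simp
        simp [hme]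
    · simp only [hp, if_neg, decide_eq_true_eq, if_false]
      rw [ih]
      by_cases hr : (rest.map (pvScore exts)).any (fun p => decide (p < bp)) = true
      · have hlt := pvMin_lt_of_any (rest.map (pvScore exts)) bp hr
        have hplt : (decide (pvScore exts u < bp)) = false := by simp; omega
        simp only [hr, if_true, hplt, Bool.false_or, List.findIdx_cons]
        have hne : (pvScore exts u == (rest.map (pvScore exts)).foldr min bp) = false := by
          simp; omega
        have heq : min (pvScore exts u) ((rest.map (pvScore exts)).foldr min bp)
            = (rest.map (pvScore exts)).foldr min bp := by omega
        simp only [hne, cond_false, heq, decide_false, Bool.or_true, if_true, Prod.mk.injEq]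
        exact ⟨by trivial, by omega⟩
      · have hplt : (decide (pvScore exts u < bp)) = false := by simp; omega
        simp [hr, hplt]

-- ===== VERDICT (by name: the statement is the Claim_ definition above) =====
theorem choose_primary_url_spec : Claim_equal_choose_primary_url := by
  intro urls kind _ hpre
  unfold Spec_choose_primary_url
  match urls with
  | [] => exact absurd rfl hpre
  | u0 :: rest =>
    simp only [choose_primary_url, choose_primary_url_alt]
    set exts := if kind = "image" then [".png", ".jpg", ".jpeg", ".webp"]
                else [".mp4", ".mov", ".webm", ".mkv"] with hext
    have hlowmap : ((u0 :: rest).map PySem.Str.lower).map (pvScoreGo exts)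
        = (u0 :: rest).map (pvScore exts) := by
      rw [List.map_map]; rfl
    rw [pvOuter_char, pvBestLoop_spec, hlowmap]
    set ps := (u0 :: rest).map (pvScore exts) with hps
    have hps0 : ps = pvScore exts u0 :: rest.map (pvScore exts) := by simp [hps]
    have hle : ∀ p ∈ ps, p ≤ exts.length := by
      intro p hp
      rcases List.mem_map.mp hp with ⟨u, _, rfl⟩
      exact pvScoreGo_le _ _
    have hM : ps.foldr min exts.length
        = (rest.map (pvScore exts)).foldr min (pvScore exts u0) := by
      rw [hps0, List.foldr_cons, pvMin_push]
      congr 1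
      have := hle (pvScore exts u0) (by rw [hps0]; exact List.mem_cons_self)
      omega
    by_cases hr : (rest.map (pvScore exts)).any (fun p => decide (p < pvScore exts u0)) = true
    · -- some later URL strictly beats u0's score
      have hlt := pvMin_lt_of_any _ _ hr
      have hany : ps.any (fun p => decide (p < exts.length)) = true := by
        rcases List.any_eq_true.mp hr with ⟨p, hpm, hplt⟩
        simp only [decide_eq_true_eq] at hplt
        have hp0 := hle (pvScore exts u0) (by rw [hps0]; exact List.mem_cons_self)
        refine List.any_eq_true.mpr ⟨p, by rw [hps0]; exact List.mem_cons_of_mem _ hpm, by simp; omega⟩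
      simp only [hany, hr, if_true]
      rw [hM, hps0, List.findIdx_cons]
      have hne : (pvScore exts u0 == (rest.map (pvScore exts)).foldr min (pvScore exts u0)) = false := by
        simp; omega
      simp only [hne, cond_false]
      rw [Nat.add_comm]
    · -- u0 already minimal: B picks index 0
      have hfix := pvMin_eq_of_none (rest.map (pvScore exts)) (pvScore exts u0)
        (by simpa using hr)
        (by intro p hpm; by_contra hc
            exact hr (List.any_eq_true.mpr ⟨p, hpm, by simp; omega⟩))
      have hidx0 : ps.findIdx (fun p => p == ps.foldr min exts.length) = 0 := by
        rw [hps0, List.findIdx_cons]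
        have : (pvScore exts u0 ==
            (pvScore exts u0 :: rest.map (pvScore exts)).foldr min exts.length) = true := by
          rw [← hps0, hM, hfix]; simp
        rw [← hps0] at this ⊢
        simp [this]
      simp only [hr, Bool.false_eq_true, if_false]
      by_cases hany : ps.any (fun p => decide (p < exts.length)) = true
      · simp only [hany, if_true, hidx0]
      · simp only [hany, Bool.false_eq_true, if_false]
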